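-- pv_equiv track=rewrite | github.com/varsha-gumbarthi/practiced_problems | magic_string.py | magic_string
-- ===== SOURCE A (Python) =====
-- def magic_string(str1):
--     my_dict={}
--     for i in str1:
--         if i in my_dict:
--             my_dict[i]+=1
--         else:
--             my_dict[i]=1
--     maxx=max(my_dict.values())
--     result=len(str1)-maxx
--     return result
-- ===== SOURCE B (Python) =====
-- def magic_string(str1):
--     s = sorted(str1)
--     best = 0
--     run = 0
--     prev = None
--     for c in s:
--         run = run + 1 if c == prev else 1
--         prev = c
--         if run > best:
--             best = run
--     return len(str1) - best
-- ===== Notes on version B (the rewrite author's own statement) =====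
-- stated objective: alternative
-- what changed: B replaces A's frequency-dictionary-then-max with sorting the string and a single scan tracking the longest run of equal adjacent characters.
import Mathlib
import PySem

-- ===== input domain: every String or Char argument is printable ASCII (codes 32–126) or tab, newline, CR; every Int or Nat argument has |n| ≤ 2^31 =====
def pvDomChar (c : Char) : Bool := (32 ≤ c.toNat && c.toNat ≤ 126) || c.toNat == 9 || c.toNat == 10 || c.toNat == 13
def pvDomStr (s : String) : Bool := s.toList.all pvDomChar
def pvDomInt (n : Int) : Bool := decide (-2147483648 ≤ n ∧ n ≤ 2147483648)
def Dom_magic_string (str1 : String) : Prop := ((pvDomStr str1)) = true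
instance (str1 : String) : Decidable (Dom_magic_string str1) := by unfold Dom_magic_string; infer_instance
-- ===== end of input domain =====

-- B sorts the string and takes the longest run of equal adjacent characters in one scan,
-- instead of A's frequency dictionary; a genuinely different pass of similar cost ('alternative').

-- ===== PORT A =====
def magic_string (str1 : String) : Int :=
  let my_dict : PySem.Dict Char Int := str1.toList.foldl
    (fun d i => if d.contains i then d.insert i (d.getD i 0 + 1) else d.insert i 1)
    PySem.Dict.empty
  -- max(my_dict.values()); Pre_ excludes the empty string, where Python raises ValueError
  let maxx := (PySem.List.max? my_dict.values (fun v => v)).getD 0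
  PySem.Str.len str1 - maxx

-- ===== PORT B =====
-- loop body of Source B: state = (best, run, prev)
def pvStep (st : Int × Int × Option Char) (c : Char) : Int × Int × Option Char :=
  let run := if some c = st.2.2 then st.2.1 + 1 else 1
  (if run > st.1 then run else st.1, run, some c)

def magic_string_alt (str1 : String) : Int :=
  let s := PySem.List.sorted str1.toList (fun c => c) false
  let st := s.foldl pvStep (0, 0, none)
  PySem.Str.len str1 - st.1

-- ===== PRECONDITION & SPEC =====
-- Pre_ excludes only the empty string, on which A's max([]) raises ValueError.
def Pre_magic_string (str1 : String) : Prop := str1 ≠ ""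
instance (str1 : String) : Decidable (Pre_magic_string str1) := by unfold Pre_magic_string; infer_instance
def pvWitness_magic_string : String := "aab"

def Spec_magic_string (str1 : String) (out : Int) : Prop := out = magic_string_alt str1
instance (str1 : String) (out : Int) : Decidable (Spec_magic_string str1 out) := by unfold Spec_magic_string; infer_instance

-- ===== CLAIM (what is proved, stated in full; the proofs are below) =====
def Claim_equal_magic_string : Prop := ∀ (str1 : String), Dom_magic_string str1 → Pre_magic_string str1 → Spec_magic_string str1 (magic_string str1)

-- ===== LEMMAS AND PROOFS =====

-- A's branching dict loop is Counter(str1)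
lemma pv_dict_eq_counter (l : List Char) :
    l.foldl (fun d i => if d.contains i then d.insert i (d.getD i 0 + 1) else d.insert i 1)
      (PySem.Dict.empty : PySem.Dict Char Int) = PySem.Dict.counter l := by
  have hf : (fun (d : PySem.Dict Char Int) i => if d.contains i then d.insert i (d.getD i 0 + 1) else d.insert i 1)
      = fun d i => d.insert i (d.getD i 0 + 1) := by
    funext d i
    by_cases h : d.contains i
    · simp [h]
    · simp only [Bool.not_eq_true] at h
      rw [PySem.Dict.getD_of_not_contains (h := h)]
      simp [h]
  rw [hf, PySem.Dict.foldl_insert_getD_add_one_eq_counter]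

-- the best component never drops below the initial best
lemma pv_best_le_foldl : ∀ (u : List Char) (b r : Int) (p : Option Char),
    b ≤ (u.foldl pvStep (b, r, p)).1 := by
  intro u
  induction u with
  | nil => intro b r p; simp
  | cons x t ih =>
    intro b r p
    simp only [List.foldl_cons, pvStep]
    refine le_trans ?_ (ih _ _ _)
    split <;> omega

-- a larger initial best just caps the result with max
lemma pv_best_shift : ∀ (u : List Char) (b b' r : Int) (p : Option Char), b ≤ b' →
    (u.foldl pvStep (b', r, p)).1 = max b' (u.foldl pvStep (b, r, p)).1 := by
  intro u
  induction u with
  | nil => intro b b' r p h; simp; omega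
  | cons x t ih =>
    intro b b' r p h
    simp only [List.foldl_cons, pvStep]
    set R := if some x = p then r + 1 else 1 with hR
    have h2 : (if R > b then R else b) ≤ (if R > b' then R else b') := by split <;> split <;> omega
    rw [ih _ _ _ _ h2]
    have h3 : (if R > b then R else b) ≤ (t.foldl pvStep ((if R > b then R else b), R, some x)).1 :=
      pv_best_le_foldl _ _ _ _
    have h4 : R ≤ (if R > b then R else b) := by split <;> omega
    have h5 : (if R > b' then R else b') = max b' (if R > b then R else b) := by
      split <;> split <;> omega
    rw [h5, max_assoc]
    congr 1
    omega

-- run/prev are irrelevant once the next char differs from both prevs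
lemma pv_head_indep (x : Char) (u : List Char) (b r r' : Int) (p p' : Option Char)
    (hp : some x ≠ p) (hp' : some x ≠ p') :
    ((x :: u).foldl pvStep (b, r, p)) = ((x :: u).foldl pvStep (b, r', p')) := by
  simp only [List.foldl_cons, pvStep, if_neg hp, if_neg hp']

-- a replicate-prefix just pumps the run (and the best along with it)
lemma pv_fold_rep : ∀ (n : Nat) (c : Char) (u : List Char) (r : Int),
    (List.replicate n c ++ u).foldl pvStep (r, r, some c)
      = u.foldl pvStep (r + n, r + n, some c) := by
  intro n
  induction n with
  | zero =>
    intro c u r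
    simp
  | succ m ih =>
    intro c u r
    simp only [List.replicate_succ, List.cons_append, List.foldl_cons, pvStep, if_true]
    rw [if_pos (by omega)]
    rw [ih c u (r+1)]
    push_cast; ring_nf

-- a sorted nonempty list splits off its head's full run
lemma pv_decomp : ∀ (t : List Char) (c : Char), (c :: t).Pairwise (· ≤ ·) →
    ∃ n u, t = List.replicate n c ++ u ∧ (∀ y ∈ u, c < y) ∧ u.Pairwise (· ≤ ·) := by
  intro t
  induction t with
  | nil => intro c _; exact ⟨0, [], by simp, by simp, List.Pairwise.nil⟩
  | cons d t' ih =>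
    intro c h
    have hcd : c ≤ d := (List.pairwise_cons.mp h).1 d (by simp)
    have ht : (d :: t').Pairwise (· ≤ ·) := (List.pairwise_cons.mp h).2
    by_cases hdc : d = c
    · subst hdc
      obtain ⟨n, u, h1, h2, h3⟩ := ih d ht
      exact ⟨n + 1, u, by simp [List.replicate_succ, h1], h2, h3⟩
    · refine ⟨0, d :: t', by simp, ?_, ht⟩
      intro y hy
      have hcd' : c < d := lt_of_le_of_ne hcd (fun e => hdc e.symm)
      rcases List.mem_cons.mp hy with rfl | hy'
      · exact hcd'
      · exact lt_of_lt_of_le hcd' ((List.pairwise_cons.mp ht).1 y hy')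

-- the scan over a sorted list computes the maximal multiplicity
lemma pv_best_sorted : ∀ (N : Nat) (s : List Char), s.length ≤ N → s.Pairwise (· ≤ ·) → s ≠ [] →
    (∃ c ∈ s, (s.foldl pvStep (0, 0, none)).1 = (s.count c : Int)) ∧
    (∀ c ∈ s, (s.count c : Int) ≤ (s.foldl pvStep (0, 0, none)).1) := by
  intro N
  induction N with
  | zero =>
    intro s hlen _ hne
    cases s with
    | nil => exact absurd rfl hne
    | cons c t => simp at hlen
  | succ M ih =>
    intro s hlen hsort hne
    cases s with
    | nil => exact absurd rfl hne
    | cons c t =>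
      obtain ⟨n, u, ht, hlt, hu⟩ := pv_decomp t c hsort
      subst ht
      have hstep1 : ((c :: (List.replicate n c ++ u)).foldl pvStep (0, 0, none))
          = (List.replicate n c ++ u).foldl pvStep (1, 1, some c) := by
        simp only [List.foldl_cons, pvStep]
        norm_num
      have hrep := pv_fold_rep n c u 1
      set F := ((c :: (List.replicate n c ++ u)).foldl pvStep (0, 0, none)) with hF
      have hF2 : F = u.foldl pvStep (1 + n, 1 + n, some c) := hstep1.trans hrep
      have hcc : ((c :: (List.replicate n c ++ u)).count c : Int) = 1 + n := by
        have hcu : u.count c = 0 := by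
          rw [List.count_eq_zero]
          intro hmem; exact lt_irrefl c (hlt c hmem)
        simp [List.count_append, hcu]
        omega
      have hcx : ∀ x ∈ u, (c :: (List.replicate n c ++ u)).count x = u.count x := by
        intro x hx
        have hxc : x ≠ c := fun e => lt_irrefl c (e ▸ hlt x hx)
        simp [List.count_append, List.count_replicate, Ne.symm hxc]
      cases u with
      | nil =>
        constructor
        · exact ⟨c, by simp, by rw [hF2]; simp only [List.foldl_nil]; exact hcc.symm⟩
        · intro x hx
          have : x = c := by
            rcases List.mem_cons.mp hx with rfl | hx'
            · rfl
            · simpa using (List.eq_of_mem_replicate (by simpa using hx'))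
          subst this
          rw [hF2]; simp only [List.foldl_nil]; exact le_of_eq hcc
      | cons y u' =>
        have hyne : some y ≠ some c := by
          intro e
          exact lt_irrefl c (Option.some.inj e ▸ hlt y (by simp))
        have hshift := pv_best_shift (y :: u') 0 (1 + (n : Int)) (1 + n) (some c) (by positivity)
        have hindep := pv_head_indep y u' 0 (1 + (n : Int)) 0 (some c) none hyne (by simp)
        have hFval : F.1 = max (1 + (n : Int)) ((y :: u').foldl pvStep (0, 0, none)).1 := by
          rw [hF2, hshift, hindep]
        have hlen' : (y :: u').length ≤ M := by
          simp only [List.length_cons, List.length_append, List.length_replicate] at hlen ⊢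
          omega
        obtain ⟨⟨d, hd, hdval⟩, hbound⟩ := ih (y :: u') hlen' hu (by simp)
        set Bu := ((y :: u').foldl pvStep (0, 0, none)).1 with hBu
        constructor
        · rcases le_total Bu (1 + (n : Int)) with hle | hle
          · refine ⟨c, by simp, ?_⟩
            rw [hFval, hcc, max_eq_left hle]
          · refine ⟨d, List.mem_cons_of_mem _ (List.mem_append_right _ hd), ?_⟩
            rw [hFval, max_eq_right hle, hcx d hd, hdval]
        · intro x hx
          rcases List.mem_cons.mp hx with rfl | hx'
          · rw [hcc, hFval]; exact le_max_left _ _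
          · rcases List.mem_append.mp hx' with hrep' | hxu
            · have : x = c := List.eq_of_mem_replicate hrep'
              subst this
              rw [hcc, hFval]; exact le_max_left _ _
            · rw [hcx x hxu, hFval]
              exact le_trans (hbound x hxu) (le_max_right _ _)

-- main agreement, precondition unfolded
lemma pv_main (str1 : String) (hpre : str1 ≠ "") :
    magic_string str1 = magic_string_alt str1 := by
  have hl : str1.toList ≠ [] := by
    intro h
    exact hpre (by rwa [← String.toList_eq_nil_iff])
  set l := str1.toList with hldef
  set s := PySem.List.sorted l (fun c => c) false with hsdef
  have hperm : s.Perm l := PySem.List.sorted_perm l (fun c => c) false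
  have hsne : s ≠ [] := by
    intro h
    rw [h] at hperm
    exact hl hperm.symm.eq_nil
  have hsort : s.Pairwise (· ≤ ·) := PySem.List.sorted_pairwise l (fun c => c)
  obtain ⟨⟨d, hd, hdval⟩, hbound⟩ := pv_best_sorted s.length s le_rfl hsort hsne
  set B := (s.foldl pvStep (0, 0, none)).1 with hB
  have hcount : ∀ x, s.count x = l.count x := fun x => hperm.count_eq x
  have hvals : (PySem.Dict.counter l).values = (PySem.Set.ofList l).map (fun k => (l.count k : Int)) := by
    simp only [PySem.Dict.values, PySem.Dict.items_counter, List.map_map]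
    rfl
  have hvne : (PySem.Set.ofList l).map (fun k => (l.count k : Int)) ≠ [] := by
    intro h
    rcases List.exists_mem_of_ne_nil l hl with ⟨x, hx⟩
    have : (l.count x : Int) ∈ (PySem.Set.ofList l).map (fun k => (l.count k : Int)) :=
      List.mem_map_of_mem ((PySem.Set.mem_ofList l x).mpr hx)
    rw [h] at this; exact absurd this (List.not_mem_nil)
  obtain ⟨m, hm⟩ : ∃ m, PySem.List.max? ((PySem.Set.ofList l).map (fun k => (l.count k : Int))) (fun v => v) = some m := by
    cases hmx : PySem.List.max? ((PySem.Set.ofList l).map (fun k => (l.count k : Int))) (fun v => v) with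
    | none => exact absurd ((PySem.List.max?_eq_none_iff _ _).mp hmx) hvne
    | some m => exact ⟨m, rfl⟩
  have hmmem := PySem.List.max?_mem hm
  have hmmax := PySem.List.max?_isMax hm
  have hmB : m = B := by
    rcases List.mem_map.mp hmmem with ⟨k, hk, hkm⟩
    have hk' : k ∈ l := (PySem.Set.mem_ofList l k).mp hk
    have h1 : m ≤ B := by
      rw [← hkm]
      have := hbound k (hperm.mem_iff.mpr hk')
      rwa [hcount k] at this
    have h2 : B ≤ m := by
      rw [hdval, hcount d]
      have hd' : d ∈ l := hperm.subset hd
      exact hmmax _ (List.mem_map_of_mem ((PySem.Set.mem_ofList l d).mpr hd'))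
    omega
  simp only [magic_string, magic_string_alt]
  rw [pv_dict_eq_counter, hvals, ← hldef, hm]
  simp only [Option.getD_some]
  rw [hmB]

-- ===== VERDICT (by name: the statement is the Claim_ definition above) =====
theorem magic_string_spec : Claim_equal_magic_string := by
  intro str1 _ hpre
  exact pv_main str1 hpre
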